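-- pv_equiv track=rewrite | github.com/renancatan/travel | services/api/app/core/map_entries.py | normalize_group_key
-- ===== SOURCE A (Python) =====
-- from typing import Any
--
-- MAP_GROUPS: dict[str, dict[str, Any]] = {
--     "caves": {
--         "label": "Caves",
--         "icon_key": "caves",
--         "keywords": {"cave", "caves", "stalactite", "stalagmite", "spelunk", "underground", "cavern"},
--     },
--     "beaches": {
--         "label": "Beaches",
--         "icon_key": "beaches",
--         "keywords": {"beach", "beaches", "coast", "coastal", "island", "ocean", "shore", "surf"},
--     },
--     "bars": {
--         "label": "Bars",
--         "icon_key": "bars",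
--         "keywords": {"bar", "bars", "pub", "beer", "cocktail", "nightlife"},
--     },
--     "boat": {
--         "label": "Boat",
--         "icon_key": "boat",
--         "keywords": {"boat", "boats", "sailing", "ferry", "island-hopping", "bay"},
--     },
--     "falls": {
--         "label": "Falls",
--         "icon_key": "falls",
--         "keywords": {"falls", "waterfall", "waterfalls", "cascade"},
--     },
--     "general": {
--         "label": "General",
--         "icon_key": "general",
--         "keywords": set(),
--     },
-- }
--
-- def normalize_group_key(value: Any) -> str:
--     normalized = str(value or "").strip().lower()
--     if normalized in MAP_GROUPS:
--         return normalized
--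
--     for group_key, group_meta in MAP_GROUPS.items():
--         if normalized in group_meta["keywords"]:
--             return group_key
--
--     return "general"
-- ===== SOURCE B (Python) =====
-- from typing import Any
--
-- # Flat lookup table: every group key and every keyword maps directly to its group key.
-- # Replaces MAP_GROUPS scanning entirely; unknown terms fall back to "general".
-- GROUP_BY_TERM: dict[str, str] = {
--     "caves": "caves", "cave": "caves", "stalactite": "caves", "stalagmite": "caves",
--     "spelunk": "caves", "underground": "caves", "cavern": "caves",
--     "beaches": "beaches", "beach": "beaches", "coast": "beaches", "coastal": "beaches",
--     "island": "beaches", "ocean": "beaches", "shore": "beaches", "surf": "beaches",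
--     "bars": "bars", "bar": "bars", "pub": "bars", "beer": "bars",
--     "cocktail": "bars", "nightlife": "bars",
--     "boat": "boat", "boats": "boat", "sailing": "boat", "ferry": "boat",
--     "island-hopping": "boat", "bay": "boat",
--     "falls": "falls", "waterfall": "falls", "waterfalls": "falls", "cascade": "falls",
--     "general": "general",
-- }
--
--
-- def normalize_group_key(value: Any) -> str:
--     normalized = str(value or "").strip().lower()
--     return GROUP_BY_TERM.get(normalized, "general")
-- ===== Notes on version B (the rewrite author's own statement) =====
-- stated objective: idiomatic
-- what changed: Replaced A's per-call scan over MAP_GROUPS (dict containment test plus a loop over each group's keyword set) with a single flat term-to-group dict literal, so the function is one lookup with default 'general' and the grouped structure disappears entirely.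
import Mathlib
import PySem

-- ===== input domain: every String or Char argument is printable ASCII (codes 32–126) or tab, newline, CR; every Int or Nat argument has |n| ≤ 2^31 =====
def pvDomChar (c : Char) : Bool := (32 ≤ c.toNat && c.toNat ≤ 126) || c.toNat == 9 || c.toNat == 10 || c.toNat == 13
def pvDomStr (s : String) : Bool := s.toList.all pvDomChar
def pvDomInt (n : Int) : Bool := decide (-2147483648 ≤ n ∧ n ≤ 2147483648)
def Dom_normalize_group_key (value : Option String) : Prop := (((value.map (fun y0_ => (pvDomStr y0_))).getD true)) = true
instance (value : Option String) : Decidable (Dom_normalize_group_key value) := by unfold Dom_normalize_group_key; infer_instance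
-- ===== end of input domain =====

-- B replaces A's scan over grouped MAP_GROUPS by one lookup in a flat term→group table (idiomatic).

-- ===== PORT A =====
-- A's module constant MAP_GROUPS.
structure PvGroupMeta where
  label : String
  icon_key : String
  keywords : PySem.Set String
deriving Repr, DecidableEq

def pvMapGroups : PySem.Dict String PvGroupMeta := PySem.Dict.ofList [
  ("caves",   ⟨"Caves",   "caves",   PySem.Set.ofList ["cave", "caves", "stalactite", "stalagmite", "spelunk", "underground", "cavern"]⟩),
  ("beaches", ⟨"Beaches", "beaches", PySem.Set.ofList ["beach", "beaches", "coast", "coastal", "island", "ocean", "shore", "surf"]⟩),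
  ("bars",    ⟨"Bars",    "bars",    PySem.Set.ofList ["bar", "bars", "pub", "beer", "cocktail", "nightlife"]⟩),
  ("boat",    ⟨"Boat",    "boat",    PySem.Set.ofList ["boat", "boats", "sailing", "ferry", "island-hopping", "bay"]⟩),
  ("falls",   ⟨"Falls",   "falls",   PySem.Set.ofList ["falls", "waterfall", "waterfalls", "cascade"]⟩),
  ("general", ⟨"General", "general", PySem.Set.empty⟩)]

-- A: normalize, check `normalized in MAP_GROUPS`, then scan the groups' keyword sets in order.
def normalize_group_key (value : Option String) : String :=
  let normalized := PySem.Str.lower (PySem.Str.strip (value.getD ""))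
  if pvMapGroups.contains normalized then normalized
  else
    match pvMapGroups.items.find? (fun it => PySem.Set.contains it.2.keywords normalized) with
    | some it => it.1
    | none => "general"

-- ===== PORT B =====
-- Source B's flat literal table GROUP_BY_TERM.
def pvGroupByTerm : PySem.Dict String String := PySem.Dict.ofList [
  ("caves", "caves"), ("cave", "caves"), ("stalactite", "caves"), ("stalagmite", "caves"),
  ("spelunk", "caves"), ("underground", "caves"), ("cavern", "caves"),
  ("beaches", "beaches"), ("beach", "beaches"), ("coast", "beaches"), ("coastal", "beaches"),
  ("island", "beaches"), ("ocean", "beaches"), ("shore", "beaches"), ("surf", "beaches"),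
  ("bars", "bars"), ("bar", "bars"), ("pub", "bars"), ("beer", "bars"),
  ("cocktail", "bars"), ("nightlife", "bars"),
  ("boat", "boat"), ("boats", "boat"), ("sailing", "boat"), ("ferry", "boat"),
  ("island-hopping", "boat"), ("bay", "boat"),
  ("falls", "falls"), ("waterfall", "falls"), ("waterfalls", "falls"), ("cascade", "falls"),
  ("general", "general")]

def normalize_group_key_alt (value : Option String) : String :=
  pvGroupByTerm.getD (PySem.Str.lower (PySem.Str.strip (value.getD ""))) "general"

-- ===== PRECONDITION & SPEC =====
def Spec_normalize_group_key (value : Option String) (out : String) : Prop := out = normalize_group_key_alt value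
instance (value : Option String) (out : String) : Decidable (Spec_normalize_group_key value out) := by unfold Spec_normalize_group_key; infer_instance

-- ===== CLAIM (what is proved, stated in full; the proofs are below) =====
def Claim_equal_normalize_group_key : Prop := ∀ (value : Option String), Dom_normalize_group_key value → Spec_normalize_group_key value (normalize_group_key value)

-- ===== LEMMAS AND PROOFS =====

-- every string occurring in MAP_GROUPS as a group key or keyword
def pvAllNames : List String :=
  ["caves", "beaches", "bars", "boat", "falls", "general",
   "cave", "stalactite", "stalagmite", "spelunk", "underground", "cavern",
   "beach", "coast", "coastal", "island", "ocean", "shore", "surf",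
   "bar", "pub", "beer", "cocktail", "nightlife",
   "boats", "sailing", "ferry", "island-hopping", "bay",
   "waterfall", "waterfalls", "cascade"]

set_option maxRecDepth 4000 in
theorem pvMapGroups_eq : pvMapGroups = PySem.Dict.mk
  [("caves",   ⟨"Caves",   "caves",   ["cave", "caves", "stalactite", "stalagmite", "spelunk", "underground", "cavern"]⟩),
   ("beaches", ⟨"Beaches", "beaches", ["beach", "beaches", "coast", "coastal", "island", "ocean", "shore", "surf"]⟩),
   ("bars",    ⟨"Bars",    "bars",    ["bar", "bars", "pub", "beer", "cocktail", "nightlife"]⟩),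
   ("boat",    ⟨"Boat",    "boat",    ["boat", "boats", "sailing", "ferry", "island-hopping", "bay"]⟩),
   ("falls",   ⟨"Falls",   "falls",   ["falls", "waterfall", "waterfalls", "cascade"]⟩),
   ("general", ⟨"General", "general", []⟩)] := by rfl

set_option maxRecDepth 4000 in
theorem pvGroupByTerm_eq : pvGroupByTerm = PySem.Dict.mk [
  ("caves", "caves"), ("cave", "caves"), ("stalactite", "caves"), ("stalagmite", "caves"),
  ("spelunk", "caves"), ("underground", "caves"), ("cavern", "caves"),
  ("beaches", "beaches"), ("beach", "beaches"), ("coast", "beaches"), ("coastal", "beaches"),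
  ("island", "beaches"), ("ocean", "beaches"), ("shore", "beaches"), ("surf", "beaches"),
  ("bars", "bars"), ("bar", "bars"), ("pub", "bars"), ("beer", "bars"),
  ("cocktail", "bars"), ("nightlife", "bars"),
  ("boat", "boat"), ("boats", "boat"), ("sailing", "boat"), ("ferry", "boat"),
  ("island-hopping", "boat"), ("bay", "boat"),
  ("falls", "falls"), ("waterfall", "falls"), ("waterfalls", "falls"), ("cascade", "falls"),
  ("general", "general")] := by rfl

set_option maxRecDepth 4000 in
set_option maxHeartbeats 1000000 in
theorem pv_core_eq (n : String) :
    (if pvMapGroups.contains n then n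
     else match pvMapGroups.items.find? (fun it => PySem.Set.contains it.2.keywords n) with
          | some it => it.1
          | none => "general")
    = pvGroupByTerm.getD n "general" := by
  by_cases h : n ∈ pvAllNames
  · fin_cases h <;> decide
  · simp only [pvAllNames, List.mem_cons, List.not_mem_nil, or_false] at h
    push Not at h
    obtain ⟨e1, e2, e3, e4, e5, e6, e7, e8, e9, e10, e11, e12, e13, e14, e15, e16, e17, e18, e19, e20, e21, e22, e23, e24, e25, e26, e27, e28, e29, e30, e31, e32⟩ := h
    rw [pvMapGroups_eq, pvGroupByTerm_eq]
    simp [PySem.Dict.contains, PySem.Dict.getD, PySem.Dict.get?,       PySem.Set.contains, List.find?, List.any, beq_eq_decide, e1, Ne.symm e1, e2, Ne.symm e2, e3, Ne.symm e3, e4, Ne.symm e4, e5, Ne.symm e5, Ne.symm e6, e7, Ne.symm e7, e8, Ne.symm e8, e9, Ne.symm e9, e10, Ne.symm e10, e11, Ne.symm e11, e12, Ne.symm e12, e13, Ne.symm e13, e14, Ne.symm e14, e15, Ne.symm e15, e16, Ne.symm e16, e17, Ne.symm e17, e18, Ne.symm e18, e19, Ne.symm e19, e20, Ne.symm e20, e21,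 Ne.symm e21, e22, Ne.symm e22, e23, Ne.symm e23, e24, Ne.symm e24, e25, Ne.symm e25, e26, Ne.symm e26, e27, Ne.symm e27, e28, Ne.symm e28, e29, Ne.symm e29, e30, Ne.symm e30, e31, Ne.symm e31, e32, Ne.symm e32]

-- ===== VERDICT (by name: the statement is the Claim_ definition above) =====
theorem normalize_group_key_spec : Claim_equal_normalize_group_key := by
  intro value _
  show normalize_group_key value = normalize_group_key_alt value
  simp only [normalize_group_key, normalize_group_key_alt]
  exact pv_core_eq (PySem.Str.lower (PySem.Str.strip (value.getD "")))
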